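-- pv_equiv track=rewrite | github.com/sumit-singh53/Hybrid-Quantum-Cryptography-Banking-Application | backend/scripts/generate_functional_security_report.py | chunk_lines
-- ===== SOURCE A (Python) =====
-- def chunk_lines(lines, per_page=46):
--     chunk = []
--     for line in lines:
--         chunk.append(line)
--         if len(chunk) >= per_page:
--             yield chunk
--             chunk = []
--     if chunk:
--         yield chunk
-- ===== SOURCE B (Python) =====
-- def chunk_lines(lines, per_page=46):
--     lines = list(lines)
--     size = max(per_page, 1)
--     while lines:
--         yield lines[:size]
--         lines = lines[size:]
-- ===== Notes on version B (the rewrite author's own statement) =====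
-- stated objective: idiomatic
-- what changed: B slices whole pages off a materialized list (take/drop per page) instead of appending one element at a time with a running length check; per_page <= 0 is clamped to page size 1, which reproduces A's singleton-chunk behaviour there.
import Mathlib
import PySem

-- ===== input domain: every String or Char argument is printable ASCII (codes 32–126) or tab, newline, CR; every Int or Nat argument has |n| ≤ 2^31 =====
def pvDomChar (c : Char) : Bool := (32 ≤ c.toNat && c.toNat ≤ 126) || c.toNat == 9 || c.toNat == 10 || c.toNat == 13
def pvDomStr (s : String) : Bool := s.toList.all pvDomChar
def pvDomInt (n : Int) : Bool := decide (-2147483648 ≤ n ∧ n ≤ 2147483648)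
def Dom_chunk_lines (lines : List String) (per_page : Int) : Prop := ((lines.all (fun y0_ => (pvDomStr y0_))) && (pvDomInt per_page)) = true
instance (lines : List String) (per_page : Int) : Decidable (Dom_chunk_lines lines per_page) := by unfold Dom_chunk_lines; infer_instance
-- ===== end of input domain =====

-- B chunks by slicing whole pages off the list (take/drop) instead of A's one-element
-- accumulator with a running length check; same values, idiomatic decomposition.

-- ===== PORT A =====
-- A's loop: append each line to `chunk`, flush when len(chunk) >= per_page, flush remainder.
def chunkA (lines : List String) (chunk : List String) (per_page : Int) : List (List String) :=
  match lines with
  | [] => if chunk.isEmpty then [] else [chunk]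
  | l :: ls =>
    let c := chunk ++ [l]
    if (c.length : Int) ≥ per_page then c :: chunkA ls [] per_page
    else chunkA ls c per_page

def chunk_lines (lines : List String) (per_page : Int) : List (List String) :=
  chunkA lines [] per_page

-- ===== PORT B =====
-- B's loop: while lines: yield lines[:size]; lines = lines[size:]  (size = max(per_page,1) ≥ 1,
-- so the head pattern realizes the first element of the nonempty slice).
def pagesB (lines : List String) (size : Nat) : List (List String) :=
  if lines = [] then []
  else lines.take size :: pagesB (lines.drop (max size 1)) size
  -- `max size 1` = `size` at every call site (the wrapper passes max(per_page,1) ≥ 1);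
  -- the `max` only makes termination evident, it does not change the computation.
termination_by lines.length
decreasing_by
  rename_i h
  have h1 : 0 < lines.length := List.length_pos_of_ne_nil h
  simp only [List.length_drop]
  omega

def chunk_lines_alt (lines : List String) (per_page : Int) : List (List String) :=
  pagesB lines (max per_page 1).toNat

-- ===== PRECONDITION & SPEC =====
def Spec_chunk_lines (lines : List String) (per_page : Int) (out : List (List String)) : Prop := out = chunk_lines_alt lines per_page
instance (lines : List String) (per_page : Int) (out : List (List String)) : Decidable (Spec_chunk_lines lines per_page out) := by unfold Spec_chunk_lines; infer_instance

-- ===== CLAIM (what is proved, stated in full; the proofs are below) =====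
def Claim_equal_chunk_lines : Prop := ∀ (lines : List String) (per_page : Int), Dom_chunk_lines lines per_page → Spec_chunk_lines lines per_page (chunk_lines lines per_page)

-- ===== LEMMAS AND PROOFS =====

lemma pagesB_nil (n : Nat) : pagesB [] n = [] := by
  rw [pagesB]
  simp

lemma pagesB_unfold (l : List String) (n : Nat) (hn : 1 ≤ n) (hne : l ≠ []) :
    pagesB l n = l.take n :: pagesB (l.drop n) n := by
  rw [pagesB, if_neg hne, Nat.max_eq_left hn]

lemma chunkA_pages (pp : Int) (n : Nat) (hn : (n : Int) = max pp 1) :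
    ∀ (lines chunk : List String), chunk.length < n →
      chunkA lines chunk pp =
        if lines = [] then (if chunk.isEmpty then [] else [chunk])
        else (chunk ++ lines.take (n - chunk.length)) ::
              pagesB (lines.drop (n - chunk.length)) n := by
  have hn1 : 1 ≤ n := by omega
  intro lines
  induction lines with
  | nil => intro chunk _; simp [chunkA]
  | cons l ls ih =>
    intro chunk hlen
    rw [chunkA]
    simp only [List.length_append, List.length_singleton]
    by_cases hc : ((chunk.length : Int) + 1 ≥ pp)
    · have hfull : chunk.length + 1 = n := by omega
      rw [if_pos (by push_cast; omega)]
      have htk : n - chunk.length = 1 := by omega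
      rw [if_neg (List.cons_ne_nil l ls), htk]
      simp only [List.take_succ_cons, List.take_zero, List.drop_succ_cons, List.drop_zero]
      have hls : chunkA ls [] pp = pagesB ls n := by
        have h0 := ih [] (by simp only [List.length_nil]; omega)
        simp only [List.length_nil, Nat.sub_zero, List.isEmpty_nil, if_true,
          List.nil_append] at h0
        cases ls with
        | nil => simpa [pagesB_nil] using h0
        | cons a as =>
          rw [h0, if_neg (List.cons_ne_nil a as),
            pagesB_unfold (a :: as) n hn1 (List.cons_ne_nil a as)]
      rw [hls]
    · have hlt : chunk.length + 1 < n := by omega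
      rw [if_neg (by push_cast; omega)]
      have h0 := ih (chunk ++ [l]) (by simp only [List.length_append, List.length_singleton]; omega)
      rw [h0]
      simp only [List.length_append, List.length_singleton]
      have ht : n - chunk.length = (n - (chunk.length + 1)) + 1 := by omega
      rw [if_neg (List.cons_ne_nil l ls), ht]
      cases ls with
      | nil =>
        simp [List.isEmpty_iff, pagesB_nil]
      | cons a as =>
        simp only [if_neg (List.cons_ne_nil a as), List.take_succ_cons, List.drop_succ_cons,
          List.append_assoc, List.singleton_append]

-- ===== VERDICT (by name: the statement is the Claim_ definition above) =====
theorem chunk_lines_spec : Claim_equal_chunk_lines := by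
  intro lines per_page _
  unfold Spec_chunk_lines chunk_lines chunk_lines_alt
  set n := (max per_page 1).toNat with hndef
  have hn : (n : Int) = max per_page 1 := by
    have h1 : (1 : Int) ≤ max per_page 1 := le_max_right _ _
    simp only [hndef]
    omega
  have hn1 : 1 ≤ n := by omega
  rw [chunkA_pages per_page n hn lines [] (by simp only [List.length_nil]; omega)]
  cases lines with
  | nil => simp [pagesB_nil]
  | cons a as =>
    rw [if_neg (List.cons_ne_nil a as),
      pagesB_unfold (a :: as) n hn1 (List.cons_ne_nil a as)]
    simp
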